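-- pv_equiv track=rewrite | github.com/prpande/skills | skill-tests/design-coverage/tests/test_multi_anchor_disambiguate.py | detect_multi_anchor_groups
-- ===== SOURCE A (Python) =====
-- def _strip_suffix(name: str, suffixes: list[str]) -> str:
--     for sfx in suffixes:
--         if name.endswith(sfx):
--             return name[: -len(sfx)]
--     return name
--
-- def detect_multi_anchor_groups(
--     candidates: list[dict],
--     suffixes: list[str],
-- ) -> dict[str, list[dict]]:
--     """Return {base_name: [candidates]} for every group with N >= 2 members."""
--     from collections import defaultdict
--     groups: dict[str, list[dict]] = defaultdict(list)
--     for c in candidates: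
--         base = _strip_suffix(c["class_name"], suffixes)
--         groups[base].append(c)
--     return {b: g for b, g in groups.items() if len(g) >= 2}
-- ===== SOURCE B (Python) =====
-- def _strip_suffix(name: str, suffixes: list[str]) -> str:
--     return next((name[: -len(sfx)] for sfx in suffixes if name.endswith(sfx)), name)
--
--
-- def detect_multi_anchor_groups(
--     candidates: list[dict],
--     suffixes: list[str],
-- ) -> dict[str, list[dict]]:
--     """Partition-by-first-base: repeatedly split off the head's whole group.
--
--     No dictionary of groups is ever built: each round takes the base of the
--     first remaining candidate, extracts its entire group by a scan, emits it
--     when it has >= 2 members, and recurses (iteratively) on what is left.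
--     """
--     pairs = [(_strip_suffix(c["class_name"], suffixes), c) for c in candidates]
--     result: dict[str, list[dict]] = {}
--     rest = pairs
--     while rest:
--         base = rest[0][0]
--         group = [c for b, c in rest if b == base]
--         if len(group) >= 2:
--             result[base] = group
--         rest = [(b, c) for b, c in rest if b != base]
--     return result
-- ===== Notes on version B (the rewrite author's own statement) =====
-- stated objective: alternative
-- what changed: A accumulates every group into a defaultdict in one pass and then filters by size; B never builds a group dictionary: it repeatedly partitions the remaining candidate list around the first element's base name, emitting each extracted group when it has >= 2 members, so groups are produced one at a time by repeated list scans.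
-- outside the precondition, e.g. on detect_multi_anchor_groups([{'name': 'X'}], []): A raises KeyError, B raises KeyError
import Mathlib
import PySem

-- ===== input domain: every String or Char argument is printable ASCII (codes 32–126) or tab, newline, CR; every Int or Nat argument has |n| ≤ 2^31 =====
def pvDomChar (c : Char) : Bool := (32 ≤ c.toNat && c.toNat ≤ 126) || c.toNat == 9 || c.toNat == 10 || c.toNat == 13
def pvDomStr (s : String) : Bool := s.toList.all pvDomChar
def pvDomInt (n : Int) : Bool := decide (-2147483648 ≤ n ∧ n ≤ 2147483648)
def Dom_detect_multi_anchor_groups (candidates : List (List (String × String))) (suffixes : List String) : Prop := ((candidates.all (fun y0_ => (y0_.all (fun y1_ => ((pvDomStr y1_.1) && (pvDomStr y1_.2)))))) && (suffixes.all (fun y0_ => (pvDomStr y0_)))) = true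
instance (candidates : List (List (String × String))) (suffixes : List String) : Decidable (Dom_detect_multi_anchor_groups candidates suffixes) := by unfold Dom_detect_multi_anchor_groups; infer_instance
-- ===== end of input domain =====

-- ===== PORT A =====
-- B replaces A's build-all-groups-then-filter dict pass by a partition-by-first-base loop
-- that never builds a group dictionary; equal output (alternative decomposition, no speed claim).
def stripSuffixA (name : String) (suffixes : List String) : String :=
  match suffixes with
  | [] => name
  | sfx :: rest =>
      if PySem.Str.endswith name sfx then PySem.Str.slice name none (some (-(PySem.Str.len sfx)))
      else stripSuffixA name rest

def detect_multi_anchor_groups (candidates : List (List (String × String))) (suffixes : List String) : List (String × List (List (String × String))) :=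
  let groups := candidates.foldl
    (fun d c => d.modify (stripSuffixA ((PySem.Dict.mk c).getD "class_name" "") suffixes) [] (fun g => g ++ [c]))
    PySem.Dict.empty
  groups.items.filter (fun p => decide (2 ≤ p.2.length))

-- ===== PORT B =====
def stripSuffixB (name : String) (suffixes : List String) : String :=
  match suffixes.find? (fun sfx => PySem.Str.endswith name sfx) with
  | some sfx => PySem.Str.slice name none (some (-(PySem.Str.len sfx)))
  | none => name

-- the while loop of Source B: split off the head's whole group, recurse on the remainder
def goB : List (String × List (String × String)) → List (String × List (List (String × String)))
  | [] => []
  | p :: t =>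
      let group := ((p :: t).filter (fun q => q.1 == p.1)).map (fun q => q.2)
      (if 2 ≤ group.length then [(p.1, group)] else []) ++
        goB ((p :: t).filter (fun q => !(q.1 == p.1)))
termination_by l => l.length
decreasing_by
  have h : (p :: t).filter (fun q => !(q.1 == p.1)) = t.filter (fun q => !(q.1 == p.1)) := by
    simp
  rw [h]
  have := List.length_filter_le (fun q => !(q.1 == p.1)) t
  simp only [List.length_cons]
  omega

def detect_multi_anchor_groups_alt (candidates : List (List (String × String))) (suffixes : List String) : List (String × List (List (String × String))) :=
  let pairs := candidates.map (fun c => (stripSuffixB ((PySem.Dict.mk c).getD "class_name" "") suffixes, c))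
  goB pairs

-- ===== PRECONDITION & SPEC =====
-- Pre_ excludes only candidates lacking a "class_name" key, on which A (and B) raise KeyError.
def Pre_detect_multi_anchor_groups (candidates : List (List (String × String))) (suffixes : List String) : Prop :=
  candidates.all (fun c => (PySem.Dict.mk c).contains "class_name") = true
instance (candidates : List (List (String × String))) (suffixes : List String) : Decidable (Pre_detect_multi_anchor_groups candidates suffixes) := by unfold Pre_detect_multi_anchor_groups; infer_instance

def pvWitness_detect_multi_anchor_groups : (List (List (String × String))) × List String :=
  ([[("class_name", "FooBar")], [("class_name", "FooBaz")], [("class_name", "Solo")]], ["Bar", "Baz"])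

def Spec_detect_multi_anchor_groups (candidates : List (List (String × String))) (suffixes : List String) (out : List (String × List (List (String × String)))) : Prop := out = detect_multi_anchor_groups_alt candidates suffixes
instance (candidates : List (List (String × String))) (suffixes : List String) (out : List (String × List (List (String × String)))) : Decidable (Spec_detect_multi_anchor_groups candidates suffixes out) := by unfold Spec_detect_multi_anchor_groups; infer_instance

-- ===== CLAIM (what is proved, stated in full; the proofs are below) =====
def Claim_equal_detect_multi_anchor_groups : Prop := ∀ (candidates : List (List (String × String))) (suffixes : List String), Dom_detect_multi_anchor_groups candidates suffixes → Pre_detect_multi_anchor_groups candidates suffixes → Spec_detect_multi_anchor_groups candidates suffixes (detect_multi_anchor_groups candidates suffixes)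

-- ===== LEMMAS AND PROOFS =====

theorem strip_eq (name : String) (suffixes : List String) :
    stripSuffixB name suffixes = stripSuffixA name suffixes := by
  induction suffixes with
  | nil => rfl
  | cons s rest ih =>
      cases h : PySem.Str.endswith name s
      · simp only [stripSuffixA, stripSuffixB, List.find?_cons, h, Bool.false_eq_true,
          if_false]
        exact ih
      · simp only [stripSuffixA, stripSuffixB, List.find?_cons, h, if_true]

theorem ofList_filter (p : String → Bool) (xs : List String) :
    PySem.Set.ofList (xs.filter p) = (PySem.Set.ofList xs).filter p := by
  induction xs with
  | nil => rfl
  | cons x xs ih =>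
      by_cases h : p x = true
      · rw [List.filter_cons_of_pos h, PySem.Set.ofList_cons, PySem.Set.ofList_cons, ih,
          List.filter_cons_of_pos h]
        congr 1
        simp only [PySem.Set.discard, List.filter_filter]
        refine List.filter_congr fun a _ => ?_
        exact Bool.and_comm _ _
      · rw [List.filter_cons_of_neg h, PySem.Set.ofList_cons, ih, List.filter_cons_of_neg h]
        simp only [PySem.Set.discard, List.filter_filter]
        refine List.filter_congr fun a _ => ?_
        by_cases hx : a = x
        · subst hx; simp [Bool.of_not_eq_true h]
        · simp [hx]

theorem map_fst_filter {α β : Type} (m : List (α × β)) (pb : α → Bool) :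
    (m.filter (fun q => pb q.1)).map (fun q => q.1) = (m.map (fun q => q.1)).filter pb := by
  rw [List.filter_map]; rfl

theorem items_groupFold (m : List (String × List (String × String))) :
    (m.foldl (fun d p => d.modify p.1 [] (fun g => g ++ [p.2])) PySem.Dict.empty).items
      = (PySem.Set.ofList (m.map (fun q => q.1))).map
          (fun b => (b, (m.filter (fun q => q.1 == b)).map (fun q => q.2))) := by
  have hnd : (m.foldl (fun d p => d.modify p.1 [] (fun g => g ++ [p.2])) PySem.Dict.empty).keys.Nodup :=
    PySem.Dict.nodup_keys_foldl_modify_key m (fun q => q.1) [] (fun _ p => fun g => g ++ [p.2]) _ PySem.Dict.nodup_keys_empty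
  have hk : (m.foldl (fun d p => d.modify p.1 [] (fun g => g ++ [p.2])) PySem.Dict.empty).keys
      = PySem.Set.ofList (m.map (fun q => q.1)) := by
    rw [PySem.Dict.keys_foldl_modify_key m (fun q => q.1) [] (fun _ p => fun g => g ++ [p.2])]
    simp [PySem.Set.update_nil_left]
  rw [PySem.Dict.items_eq_map_keys _ hnd [], hk]
  refine List.map_congr_left fun b _ => ?_
  rw [PySem.Dict.getD_foldl_modify_append]
  simp

-- characterization of B's partition loop: goB emits, in first-occurrence order of base names,
-- exactly the groups of size >= 2
theorem goB_eq (l : List (String × List (String × String))) :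
    goB l = ((PySem.Set.ofList (l.map (fun q => q.1))).map
        (fun b => (b, (l.filter (fun q => q.1 == b)).map (fun q => q.2)))).filter
        (fun p => decide (2 ≤ p.2.length)) := by
  induction l using goB.induct with
  | case1 => simp [goB]
  | case2 p t ih =>
      have hrest : (p :: t).filter (fun q => !(q.1 == p.1)) = t.filter (fun q => !(q.1 == p.1)) := by
        simp
      set S := PySem.Set.ofList (t.map (fun q : String × List (String × String) => q.1)) with hS
      have hmf : ((p :: t).filter (fun q => !(q.1 == p.1))).map (fun q => q.1)
          = (t.map (fun q => q.1)).filter (fun x => !(x == p.1)) := by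
        rw [hrest]; exact map_fst_filter t (fun x => !(x == p.1))
      have hof : PySem.Set.ofList (((p :: t).filter (fun q => !(q.1 == p.1))).map (fun q => q.1))
          = PySem.Set.discard S p.1 := by
        rw [hmf, ofList_filter]; rfl
      have hgc : ∀ b ∈ PySem.Set.discard S p.1,
          (((p :: t).filter (fun q => !(q.1 == p.1))).filter (fun q => q.1 == b)).map (fun q => q.2)
            = ((p :: t).filter (fun q => q.1 == b)).map (fun q => q.2) := by
        intro b hb
        have hbp : b ≠ p.1 := by simpa using (List.mem_filter.mp hb).2
        have hpb : p.1 ≠ b := Ne.symm hbp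
        rw [hrest, List.filter_filter]
        have h1 : t.filter (fun q => q.1 == b && !(q.1 == p.1)) = t.filter (fun q => q.1 == b) := by
          refine List.filter_congr fun q _ => ?_
          by_cases h : q.1 = b
          · simp [h, hbp]
          · simp [h]
        have h2 : (p :: t).filter (fun q => q.1 == b) = t.filter (fun q => q.1 == b) := by
          simp [hpb]
        rw [h1, h2]
      rw [goB]
      rw [ih, hof]
      have hmapc : (PySem.Set.discard S p.1).map
            (fun b => (b, (((p :: t).filter (fun q => !(q.1 == p.1))).filter (fun q => q.1 == b)).map (fun q => q.2)))
          = (PySem.Set.discard S p.1).map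
            (fun b => (b, ((p :: t).filter (fun q => q.1 == b)).map (fun q => q.2))) := by
        refine List.map_congr_left fun b hb => ?_
        rw [hgc b hb]
      rw [hmapc]
      have hcons : (p :: t).map (fun q : String × List (String × String) => q.1)
          = p.1 :: t.map (fun q => q.1) := rfl
      rw [hcons, PySem.Set.ofList_cons, List.map_cons]
      have hself : (p :: t).filter (fun q => q.1 == p.1) = p :: t.filter (fun q => q.1 == p.1) := by
        simp
      rw [hself, List.filter_cons]
      by_cases h : 2 ≤ ((p :: t.filter (fun q => q.1 == p.1)).map
          (fun q : String × List (String × String) => q.2)).length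
      · rw [if_pos h, if_pos (by simpa using h), List.singleton_append]
      · rw [if_neg h, if_neg (by simpa using h), List.nil_append]

-- ===== VERDICT (by name: the statement is the Claim_ definition above) =====
theorem detect_multi_anchor_groups_spec : Claim_equal_detect_multi_anchor_groups := by
  intro candidates suffixes _ _
  unfold Spec_detect_multi_anchor_groups
  simp only [detect_multi_anchor_groups, detect_multi_anchor_groups_alt, strip_eq]
  have hfold : candidates.foldl
        (fun d c => d.modify (stripSuffixA ((PySem.Dict.mk c).getD "class_name" "") suffixes) [] (fun g => g ++ [c]))
        PySem.Dict.empty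
      = (candidates.map (fun c => (stripSuffixA ((PySem.Dict.mk c).getD "class_name" "") suffixes, c))).foldl
          (fun d p => d.modify p.1 [] (fun g => g ++ [p.2])) PySem.Dict.empty := by
    rw [List.foldl_map]
  rw [hfold, items_groupFold, goB_eq]
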